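-- pv_equiv track=rewrite | github.com/hampusjohansson1/adv.websec | Assignment2 - Anonymity/Disclosure2.py | exclusion
-- ===== SOURCE A (Python) =====
-- def exclusion(learnList,badguysets):
--     for badset in badguysets:
--         before = False;
--         templearn = learnList.copy();
--
--         for i,learnSet in enumerate(learnList):
--             if len(badset.intersection(learnSet)) > 0 and before == False:
--                 templearn[i] = badset.intersection(learnSet);
--                 before = True;
--             elif len(badset.intersection(learnSet)) > 0:
--                 before = False;
--                 break;
--
--         if before == True:
--             learnList = templearn.copy();
--
--     return learnList;
-- ===== SOURCE B (Python) =====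
-- def exclusion(learnList, badguysets):
--     # Inverted index: element -> set of positions of learnList sets containing it.
--     # Maintained incrementally as sets shrink, so each badset is handled by
--     # union-ing posting lists instead of scanning every learn set.
--     index = {}
--     for i, s in enumerate(learnList):
--         for e in s:
--             index[e] = index.get(e, set()) | {i}
--     cur = learnList
--     for badset in badguysets:
--         matches = set()
--         for e in badset:
--             matches |= index.get(e, set())
--         if len(matches) == 1:
--             (i,) = matches
--             inter = badset & cur[i]
--             for e in cur[i] - inter:
--                 index[e] = index.get(e, set()) - {i}
--             new = list(cur)
--             new[i] = inter
--             cur = new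
--     return cur
-- ===== Notes on version B (the rewrite author's own statement) =====
-- stated objective: alternative
-- what changed: Replaces A's per-badset scan over all learn sets (before-flag/early-break state machine) with an inverted index element->positions built once and maintained incrementally: for each badset the matching positions are the union of its elements' posting lists, and the unique match is updated with the posting lists adjusted for the removed elements.
import Mathlib
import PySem

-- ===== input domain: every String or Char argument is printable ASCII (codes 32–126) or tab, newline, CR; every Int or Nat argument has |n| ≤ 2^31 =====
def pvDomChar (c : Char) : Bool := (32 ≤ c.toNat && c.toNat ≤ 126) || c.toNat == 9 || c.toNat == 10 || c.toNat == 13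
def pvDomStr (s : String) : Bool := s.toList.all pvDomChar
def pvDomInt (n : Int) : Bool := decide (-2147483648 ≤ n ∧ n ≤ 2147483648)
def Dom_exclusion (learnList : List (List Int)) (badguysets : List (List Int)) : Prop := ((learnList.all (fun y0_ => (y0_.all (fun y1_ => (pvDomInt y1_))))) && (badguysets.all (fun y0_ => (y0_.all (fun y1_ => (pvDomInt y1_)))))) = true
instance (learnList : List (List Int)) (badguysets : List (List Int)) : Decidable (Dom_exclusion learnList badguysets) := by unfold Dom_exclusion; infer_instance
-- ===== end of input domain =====

-- B replaces A's per-badset scan over all learn sets (before-flag/early-break state machine) with an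
-- inverted index element -> positions, built once and maintained incrementally; for each badset the
-- matching positions are the union of its elements' posting lists (alternative decomposition, same result).

-- ===== PORT A =====
-- A's inner 'for i,learnSet in enumerate(learnList)' loop: the 'before' flag, the update of
-- templearn at the first match, and the early 'break' on a second match (which leaves before = false).
def exclInner (badset : List Int) :
    List (Int × List Int) → Bool → List (List Int) → Bool × List (List Int)
  | [], before, temp => (before, temp)
  | (i, s) :: rest, before, temp =>
      if 0 < (PySem.Set.inter badset s).length ∧ before = false then
        exclInner badset rest true (PySem.List.pySetD temp i (PySem.Set.inter badset s))
      else if 0 < (PySem.Set.inter badset s).length then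
        (false, temp)
      else
        exclInner badset rest before temp

def exclusion (learnList : List (List Int)) (badguysets : List (List Int)) : List (List Int) :=
  badguysets.foldl
    (fun cur badset =>
      let r := exclInner badset (PySem.List.enumerate cur 0) false cur
      if r.1 = true then r.2 else cur)
    learnList

-- ===== PORT B =====
-- Source B's initial index build: for i,s in enumerate(learnList): for e in s: index[e] = index.get(e, set()) | {i}
def buildIndex (learnList : List (List Int)) : PySem.Dict Int (PySem.Set Int) :=
  (PySem.List.enumerate learnList 0).foldl
    (fun d p => p.2.foldl (fun d e => d.modify e [] (fun t => PySem.Set.union t [p.1])) d)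
    PySem.Dict.empty

-- Source B's per-badset step on the state (cur, index): hitset = union of posting lists; on a unique
-- match i, update the index for the removed elements and set cur[i] to the intersection.
def exclStep (cur : List (List Int)) (idx : PySem.Dict Int (PySem.Set Int)) (badset : List Int) :
    List (List Int) × PySem.Dict Int (PySem.Set Int) :=
  match badset.foldl (fun m e => PySem.Set.union m (idx.getD e [])) ([] : PySem.Set Int) with
  | [i] =>
      let inter := PySem.Set.inter badset (PySem.List.pyGetD cur i [])
      let removed := PySem.Set.diff (PySem.List.pyGetD cur i []) inter
      let idx' := removed.foldl (fun d e => d.modify e [] (fun t => PySem.Set.diff t [i])) idx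
      (PySem.List.pySetD cur i inter, idx')
  | _ => (cur, idx)

def exclusion_alt (learnList : List (List Int)) (badguysets : List (List Int)) : List (List Int) :=
  (badguysets.foldl (fun st badset => exclStep st.1 st.2 badset) (learnList, buildIndex learnList)).1

-- ===== PRECONDITION & SPEC =====
def Spec_exclusion (learnList : List (List Int)) (badguysets : List (List Int)) (out : List (List Int)) : Prop := out = exclusion_alt learnList badguysets
instance (learnList : List (List Int)) (badguysets : List (List Int)) (out : List (List Int)) : Decidable (Spec_exclusion learnList badguysets out) := by unfold Spec_exclusion; infer_instance

-- ===== CLAIM (what is proved, stated in full; the proofs are below) =====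
def Claim_equal_exclusion : Prop := ∀ (learnList : List (List Int)) (badguysets : List (List Int)), Dom_exclusion learnList badguysets → Spec_exclusion learnList badguysets (exclusion learnList badguysets)

-- ===== LEMMAS AND PROOFS =====

-- the invariant tying the inverted index to the current list of learn sets
def ExclInv (cur : List (List Int)) (idx : PySem.Dict Int (PySem.Set Int)) : Prop :=
  ∀ e : Int, ((idx.getD e []).Nodup ∧
    ∀ j : Int, j ∈ idx.getD e [] ↔ ∃ k : Nat, k < cur.length ∧ j = (k : Int) ∧ e ∈ cur.getD k [])

-- ----- A-side characterisation (flag/break loop) -----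
theorem all_isEmpty_eq_filter_isEmpty (bs : List Int) (l : List (Int × List Int)) :
    (l.all (fun p => (PySem.Set.inter bs p.2).isEmpty))
      = (l.filter (fun p => !(PySem.Set.inter bs p.2).isEmpty)).isEmpty := by
  induction l with
  | nil => rfl
  | cons q qs ihq =>
      by_cases hq : (PySem.Set.inter bs q.2).isEmpty = true
      · simp [List.all_cons, hq, ihq]
      · simp [List.all_cons, hq]

theorem exclInner_true (bs : List Int) (ps : List (Int × List Int)) (temp : List (List Int)) :
    exclInner bs ps true temp = (ps.all (fun p => (PySem.Set.inter bs p.2).isEmpty), temp) := by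
  induction ps generalizing temp with
  | nil => rfl
  | cons p rest ih =>
      obtain ⟨i, s⟩ := p
      by_cases h : PySem.Set.inter bs s = []
      · simp [exclInner, h, ih]
      · have hlen : 0 < (PySem.Set.inter bs s).length := List.length_pos_iff.mpr h
        simp [exclInner, hlen, h]

theorem exclInner_false (bs : List Int) (ps : List (Int × List Int)) (temp : List (List Int)) :
    exclInner bs ps false temp =
      match ps.filter (fun p => !(PySem.Set.inter bs p.2).isEmpty) with
      | [] => (false, temp)
      | (i, s) :: rest =>
          (rest.isEmpty, PySem.List.pySetD temp i (PySem.Set.inter bs s)) := by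
  induction ps generalizing temp with
  | nil => rfl
  | cons p rest ih =>
      obtain ⟨i, s⟩ := p
      by_cases h : PySem.Set.inter bs s = []
      · have he : (PySem.Set.inter bs s).isEmpty = true := by simp [h]
        have hlen : ¬ 0 < (PySem.Set.inter bs s).length := by simp [h]
        simp only [exclInner, List.filter_cons, he, Bool.not_true]
        rw [if_neg (fun hc => hlen hc.1), if_neg hlen, if_neg (by simp)]
        exact ih temp
      · have hlen : 0 < (PySem.Set.inter bs s).length := List.length_pos_iff.mpr h
        have hne : (PySem.Set.inter bs s).isEmpty = false := by simp [h]
        simp [exclInner, hlen, hne, exclInner_true, all_isEmpty_eq_filter_isEmpty]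

-- ----- B-side: closed forms for the index-updating folds -----
theorem union_single_idem (t : PySem.Set Int) (i : Int) :
    PySem.Set.union (PySem.Set.union t [i]) [i] = PySem.Set.union t [i] :=
  PySem.Set.add_of_mem ((PySem.Set.mem_add _ _ _).mpr (Or.inr rfl))

theorem diff_single_idem (t : PySem.Set Int) (i : Int) :
    PySem.Set.diff (PySem.Set.diff t [i]) [i] = PySem.Set.diff t [i] := by
  simp [PySem.Set.diff]

theorem getD_fold_union (s : List Int) (d : PySem.Dict Int (PySem.Set Int)) (i e : Int) :
    (s.foldl (fun d e => d.modify e [] (fun t => PySem.Set.union t [i])) d).getD e []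
    = if e ∈ s then PySem.Set.union (d.getD e []) [i] else d.getD e [] := by
  induction s generalizing d with
  | nil => simp
  | cons x xs ih =>
      simp only [List.foldl_cons]
      rw [ih, PySem.Dict.getD_modify]
      by_cases hx : e = x
      · subst hx
        by_cases hs : e ∈ xs
        · simp [hs, union_single_idem]
        · simp [hs]
      · by_cases hs : e ∈ xs
        · simp [hx, hs]
        · simp [hx, hs]

theorem getD_fold_diff (s : List Int) (d : PySem.Dict Int (PySem.Set Int)) (i e : Int) :
    (s.foldl (fun d e => d.modify e [] (fun t => PySem.Set.diff t [i])) d).getD e []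
    = if e ∈ s then PySem.Set.diff (d.getD e []) [i] else d.getD e [] := by
  induction s generalizing d with
  | nil => simp
  | cons x xs ih =>
      simp only [List.foldl_cons]
      rw [ih, PySem.Dict.getD_modify]
      by_cases hx : e = x
      · subst hx
        by_cases hs : e ∈ xs
        · simp [hs, diff_single_idem]
        · simp [hs]
      · by_cases hs : e ∈ xs
        · simp [hx, hs]
        · simp [hx, hs]

theorem build_mem (ps : List (Int × List Int)) (d : PySem.Dict Int (PySem.Set Int)) (e j : Int) :
    j ∈ (ps.foldl (fun d p => p.2.foldl (fun d e => d.modify e [] (fun t => PySem.Set.union t [p.1])) d) d).getD e []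
    ↔ j ∈ d.getD e [] ∨ ∃ p ∈ ps, e ∈ p.2 ∧ j = p.1 := by
  induction ps generalizing d with
  | nil => simp
  | cons p ps ih =>
      simp only [List.foldl_cons]
      rw [ih, getD_fold_union]
      by_cases hp : e ∈ p.2
      · simp only [hp, if_pos]
        have : PySem.Set.union (d.getD e []) [p.1] = PySem.Set.add (d.getD e []) p.1 := rfl
        rw [this]
        simp only [PySem.Set.mem_add, List.mem_cons]
        constructor
        · rintro (⟨h | h⟩ | ⟨q, hq, hq2⟩)
          · exact Or.inl h
          · exact Or.inr ⟨p, Or.inl rfl, hp, h⟩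
          · exact Or.inr ⟨q, Or.inr hq, hq2⟩
        · rintro (h | ⟨q, (rfl | hq), hq2, hq3⟩)
          · exact Or.inl (Or.inl h)
          · exact Or.inl (Or.inr hq3)
          · exact Or.inr ⟨q, hq, hq2, hq3⟩
      · simp only [hp, if_false, List.mem_cons]
        constructor
        · rintro (h | ⟨q, hq, hq2⟩)
          · exact Or.inl h
          · exact Or.inr ⟨q, Or.inr hq, hq2⟩
        · rintro (h | ⟨q, (rfl | hq), hq2, hq3⟩)
          · exact Or.inl h
          · exact absurd hq2 hp
          · exact Or.inr ⟨q, hq, hq2, hq3⟩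

theorem build_nodup (ps : List (Int × List Int)) (d : PySem.Dict Int (PySem.Set Int))
    (h : ∀ e, (d.getD e []).Nodup) :
    ∀ e, ((ps.foldl (fun d p => p.2.foldl (fun d e => d.modify e [] (fun t => PySem.Set.union t [p.1])) d) d).getD e []).Nodup := by
  induction ps generalizing d with
  | nil => exact h
  | cons p ps ih =>
      simp only [List.foldl_cons]
      refine ih _ (fun e => ?_)
      rw [getD_fold_union]
      split
      · exact PySem.Set.nodup_union _ _ (h e)
      · exact h e

theorem inv_build (learnList : List (List Int)) : ExclInv learnList (buildIndex learnList) := by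
  intro e
  constructor
  · exact build_nodup _ _ (fun e => by simp) e
  · intro j
    unfold buildIndex
    rw [build_mem]
    simp only [PySem.Dict.getD_empty, List.not_mem_nil, false_or]
    constructor
    · rintro ⟨p, hp, hep, hjp⟩
      obtain ⟨k, hk, rfl⟩ := (PySem.List.mem_enumerate_iff _ _ _).mp hp
      exact ⟨k, hk, by simpa using hjp, by
        rw [List.getD_eq_getElem _ _ hk]; simpa using hep⟩
    · rintro ⟨k, hk, rfl, hev⟩
      refine ⟨((k : Int), learnList[k]), (PySem.List.mem_enumerate_iff _ _ _).mpr ⟨k, hk, by simp⟩, ?_, by simp⟩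
      rw [List.getD_eq_getElem _ _ hk] at hev
      simpa using hev

-- ----- the per-badset hitset -----
theorem hits_mem (bs : List Int) (idx : PySem.Dict Int (PySem.Set Int)) (m : PySem.Set Int) (j : Int) :
    j ∈ bs.foldl (fun m e => PySem.Set.union m (idx.getD e [])) m ↔ j ∈ m ∨ ∃ e ∈ bs, j ∈ idx.getD e [] := by
  induction bs generalizing m with
  | nil => simp
  | cons x xs ih =>
      simp only [List.foldl_cons]
      rw [ih]
      simp only [PySem.Set.mem_union, List.mem_cons]
      constructor
      · rintro ((h | h) | ⟨e, he, he2⟩)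
        · exact Or.inl h
        · exact Or.inr ⟨x, Or.inl rfl, h⟩
        · exact Or.inr ⟨e, Or.inr he, he2⟩
      · rintro (h | ⟨e, (rfl | he), he2⟩)
        · exact Or.inl (Or.inl h)
        · exact Or.inl (Or.inr he2)
        · exact Or.inr ⟨e, he, he2⟩

theorem hits_nodup (bs : List Int) (idx : PySem.Dict Int (PySem.Set Int)) (m : PySem.Set Int)
    (hm : m.Nodup) : (bs.foldl (fun m e => PySem.Set.union m (idx.getD e [])) m).Nodup := by
  induction bs generalizing m with
  | nil => exact hm
  | cons x xs ih => exact ih _ (PySem.Set.nodup_union _ _ hm)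

theorem eq_singleton_of_nodup (M : List Int) (i : Int) (hnd : M.Nodup)
    (hm : ∀ j, j ∈ M ↔ j = i) : M = [i] := by
  cases M with
  | nil => exact absurd ((hm i).mpr rfl) (by simp)
  | cons a t =>
      have ha : a = i := (hm a).mp (by simp)
      cases t with
      | nil => rw [ha]
      | cons b u =>
          have hb : b = i := (hm b).mp (by simp)
          rw [List.nodup_cons] at hnd
          exact absurd (show i ∈ b :: u by rw [hb]; simp) (ha ▸ hnd.1)

theorem inter_ne_nil_iff (bs s : List Int) :
    PySem.Set.inter bs s ≠ [] ↔ ∃ e ∈ bs, e ∈ s := by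
  constructor
  · intro h
    obtain ⟨e, he⟩ := List.exists_mem_of_ne_nil _ h
    exact ⟨e, ((PySem.Set.mem_inter _ _ _).mp he).1, ((PySem.Set.mem_inter _ _ _).mp he).2⟩
  · rintro ⟨e, he, hes⟩ hnil
    have : e ∈ PySem.Set.inter bs s := (PySem.Set.mem_inter _ _ _).mpr ⟨he, hes⟩
    rw [hnil] at this
    exact absurd this (by simp)

-- the big per-step lemma: one outer step of A equals one step of B, and the invariant is preserved
theorem step_eq_and_inv (cur : List (List Int)) (idx : PySem.Dict Int (PySem.Set Int))
    (bs : List Int) (hinv : ExclInv cur idx) :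
    (let r := exclInner bs (PySem.List.enumerate cur 0) false cur
     if r.1 = true then r.2 else cur) = (exclStep cur idx bs).1
    ∧ ExclInv (exclStep cur idx bs).1 (exclStep cur idx bs).2 := by
  have hA := exclInner_false bs (PySem.List.enumerate cur 0) cur
  have hMnodup : (bs.foldl (fun m e => PySem.Set.union m (idx.getD e [])) ([] : PySem.Set Int)).Nodup :=
    hits_nodup bs idx [] List.nodup_nil
  have hMmem : ∀ j, j ∈ bs.foldl (fun m e => PySem.Set.union m (idx.getD e [])) ([] : PySem.Set Int)
      ↔ ∃ k : Nat, k < cur.length ∧ j = (k : Int) ∧ ∃ e ∈ bs, e ∈ cur.getD k [] := by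
    intro j
    rw [hits_mem]
    simp only [List.not_mem_nil, false_or]
    constructor
    · rintro ⟨e, he, hj⟩
      obtain ⟨k, hk, hjk, hev⟩ := ((hinv e).2 j).mp hj
      exact ⟨k, hk, hjk, e, he, hev⟩
    · rintro ⟨k, hk, hjk, e, he, hev⟩
      exact ⟨e, he, ((hinv e).2 j).mpr ⟨k, hk, hjk, hev⟩⟩
  have hpred : ∀ p, (p ∈ (PySem.List.enumerate cur 0).filter
        (fun p => !(PySem.Set.inter bs p.2).isEmpty))
      ↔ ∃ k : Nat, k < cur.length ∧ p = ((k : Int), cur.getD k []) ∧ PySem.Set.inter bs (cur.getD k []) ≠ [] := by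
    intro p
    rw [List.mem_filter, PySem.List.mem_enumerate_iff]
    constructor
    · rintro ⟨⟨k, hk, rfl⟩, hne⟩
      refine ⟨k, hk, by rw [List.getD_eq_getElem _ _ hk]; simp, ?_⟩
      rw [List.getD_eq_getElem _ _ hk]
      simpa using hne
    · rintro ⟨k, hk, rfl, hne⟩
      refine ⟨⟨k, hk, by rw [List.getD_eq_getElem _ _ hk]; simp⟩, ?_⟩
      simpa using hne
  cases hfil : (PySem.List.enumerate cur 0).filter (fun p => !(PySem.Set.inter bs p.2).isEmpty) with
  | nil =>
      have hMnil : bs.foldl (fun m e => PySem.Set.union m (idx.getD e [])) ([] : PySem.Set Int) = [] := by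
        rw [List.eq_nil_iff_forall_not_mem]
        intro j hj
        obtain ⟨k, hk, hjk, e, he, hev⟩ := (hMmem j).mp hj
        have hmem : ((k : Int), cur.getD k []) ∈ (PySem.List.enumerate cur 0).filter
            (fun p => !(PySem.Set.inter bs p.2).isEmpty) :=
          (hpred _).mpr ⟨k, hk, rfl, (inter_ne_nil_iff _ _).mpr ⟨e, he, hev⟩⟩
        rw [hfil] at hmem
        exact absurd hmem (by simp)
      have hB : exclStep cur idx bs = (cur, idx) := by
        unfold exclStep
        rw [hMnil]
      rw [hfil] at hA
      constructor
      · simp [hA, hB]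
      · rw [hB]
        exact hinv
  | cons p rest =>
      obtain ⟨i, s⟩ := p
      have hp1 : (i, s) ∈ (PySem.List.enumerate cur 0).filter
          (fun p => !(PySem.Set.inter bs p.2).isEmpty) := by rw [hfil]; simp
      obtain ⟨k0, hk0, hps, hne⟩ := (hpred _).mp hp1
      have hi : i = (k0 : Int) := by simpa using congrArg Prod.fst hps
      have hs : s = cur.getD k0 [] := by simpa using congrArg Prod.snd hps
      cases rest with
      | nil =>
          -- exactly one matching position
          have huniq : ∀ k : Nat, k < cur.length → PySem.Set.inter bs (cur.getD k []) ≠ [] → k = k0 := by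
            intro k hk hkne
            have hmem : ((k : Int), cur.getD k []) ∈ (PySem.List.enumerate cur 0).filter
                (fun p => !(PySem.Set.inter bs p.2).isEmpty) := (hpred _).mpr ⟨k, hk, rfl, hkne⟩
            rw [hfil] at hmem
            simp only [List.mem_singleton, Prod.mk.injEq] at hmem
            have : (k : Int) = (k0 : Int) := hmem.1.trans hi
            exact_mod_cast this
          have hMsing : bs.foldl (fun m e => PySem.Set.union m (idx.getD e [])) ([] : PySem.Set Int)
              = [(k0 : Int)] := by
            refine eq_singleton_of_nodup _ _ hMnodup (fun j => ?_)
            rw [hMmem]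
            constructor
            · rintro ⟨k, hk, rfl, e, he, hev⟩
              exact_mod_cast huniq k hk ((inter_ne_nil_iff _ _).mpr ⟨e, he, hev⟩)
            · rintro rfl
              exact ⟨k0, hk0, rfl, (inter_ne_nil_iff _ _).mp hne⟩
          have hgetD : PySem.List.pyGetD cur ((k0 : Nat) : Int) [] = cur.getD k0 [] :=
            PySem.List.pyGetD_natCast cur k0 []
          have hB : exclStep cur idx bs =
              (PySem.List.pySetD cur ((k0 : Nat) : Int) (PySem.Set.inter bs (cur.getD k0 [])),
               (PySem.Set.diff (cur.getD k0 []) (PySem.Set.inter bs (cur.getD k0 []))).foldl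
                 (fun d e => d.modify e [] (fun t => PySem.Set.diff t [((k0 : Nat) : Int)])) idx) := by
            unfold exclStep
            rw [hMsing]
            simp only [hgetD]
          rw [hfil] at hA
          have hAval : (let r := exclInner bs (PySem.List.enumerate cur 0) false cur
              if r.1 = true then r.2 else cur)
              = PySem.List.pySetD cur i (PySem.Set.inter bs s) := by
            simp [hA]
          constructor
          · rw [hAval, hB, hi, hs]
          · rw [hB]
            -- invariant after the update
            set inter' := PySem.Set.inter bs (cur.getD k0 []) with hinter'
            have hIsub : ∀ e, e ∈ inter' → e ∈ cur.getD k0 [] := by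
              intro e he
              exact ((PySem.Set.mem_inter _ _ _).mp he).2
            have hImem : ∀ e, e ∈ inter' ↔ (e ∈ bs ∧ e ∈ cur.getD k0 []) := by
              intro e
              exact PySem.Set.mem_inter _ _ _
            have hset : PySem.List.pySetD cur ((k0 : Nat) : Int) inter' = cur.set k0 inter' := by
              simp
            rw [hset]
            have hlen : (cur.set k0 inter').length = cur.length := by simp
            have hgetset : ∀ k : Nat, k < cur.length →
                (cur.set k0 inter').getD k [] = if k = k0 then inter' else cur.getD k [] := by
              intro k hk
              rw [List.getD_eq_getElem _ _ (by simpa [hlen] using hk), List.getElem_set]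
              by_cases h : k = k0
              · simp [h]
              · rw [if_neg (fun hc => h hc.symm), List.getD_eq_getElem _ _ hk]
                simp [h]
            intro e
            rw [getD_fold_diff]
            by_cases hrem : e ∈ PySem.Set.diff (cur.getD k0 []) inter'
            · have hrem' : e ∈ cur.getD k0 [] ∧ e ∉ inter' := (PySem.Set.mem_diff _ _ _).mp hrem
              rw [if_pos hrem]
              refine ⟨PySem.Set.nodup_diff _ _ ((hinv e).1), fun j => ?_⟩
              rw [PySem.Set.mem_diff, (hinv e).2 j]
              constructor
              · rintro ⟨⟨k, hk, rfl, hev⟩, hji⟩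
                have hkne : k ≠ k0 := by
                  intro hc
                  exact hji (by rw [hc]; simp)
                refine ⟨k, by simpa [hlen] using hk, rfl, ?_⟩
                rw [hgetset k hk, if_neg hkne]
                exact hev
              · rintro ⟨k, hk, rfl, hev⟩
                have hk' : k < cur.length := by simpa [hlen] using hk
                rw [hgetset k hk'] at hev
                by_cases hkk : k = k0
                · rw [if_pos hkk] at hev
                  exact absurd hev hrem'.2
                · rw [if_neg hkk] at hev
                  refine ⟨⟨k, hk', rfl, hev⟩, ?_⟩
                  simp only [List.mem_singleton]
                  exact_mod_cast hkk
            · rw [if_neg hrem]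
              have hrem' : e ∈ cur.getD k0 [] → e ∈ inter' := by
                intro hc
                by_contra hnc
                exact hrem ((PySem.Set.mem_diff _ _ _).mpr ⟨hc, hnc⟩)
              refine ⟨(hinv e).1, fun j => ?_⟩
              rw [(hinv e).2 j]
              constructor
              · rintro ⟨k, hk, rfl, hev⟩
                refine ⟨k, by simpa [hlen] using hk, rfl, ?_⟩
                rw [hgetset k hk]
                by_cases hkk : k = k0
                · rw [if_pos hkk]
                  exact hrem' (hkk ▸ hev)
                · rw [if_neg hkk]
                  exact hev
              · rintro ⟨k, hk, rfl, hev⟩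
                have hk' : k < cur.length := by simpa [hlen] using hk
                rw [hgetset k hk'] at hev
                by_cases hkk : k = k0
                · rw [if_pos hkk] at hev
                  refine ⟨k, hk', rfl, ?_⟩
                  rw [hkk]
                  exact hIsub e hev
                · rw [if_neg hkk] at hev
                  exact ⟨k, hk', rfl, hev⟩
      | cons q rest' =>
          obtain ⟨i2, s2⟩ := q
          have hq1 : (i2, s2) ∈ (PySem.List.enumerate cur 0).filter
              (fun p => !(PySem.Set.inter bs p.2).isEmpty) := by rw [hfil]; simp
          obtain ⟨k2, hk2, hqs, hne2⟩ := (hpred _).mp hq1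
          have hi2 : i2 = (k2 : Int) := by simpa using congrArg Prod.fst hqs
          have hpw : ((PySem.List.enumerate cur 0).filter
              (fun p => !(PySem.Set.inter bs p.2).isEmpty)).Pairwise (fun p q => p.1 < q.1) :=
            (PySem.List.pairwise_lt_enumerate cur 0).sublist List.filter_sublist
          have hilt : i < i2 := by
            rw [hfil] at hpw
            rw [List.pairwise_cons] at hpw
            exact hpw.1 (i2, s2) (by simp)
          have hik : (k0 : Int) ∈ bs.foldl (fun m e => PySem.Set.union m (idx.getD e [])) ([] : PySem.Set Int) :=
            (hMmem _).mpr ⟨k0, hk0, rfl, (inter_ne_nil_iff _ _).mp hne⟩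
          have hik2 : (k2 : Int) ∈ bs.foldl (fun m e => PySem.Set.union m (idx.getD e [])) ([] : PySem.Set Int) :=
            (hMmem _).mpr ⟨k2, hk2, rfl, (inter_ne_nil_iff _ _).mp hne2⟩
          have hkne : (k0 : Int) ≠ (k2 : Int) := by
            intro hc
            rw [hi, hi2] at hilt
            omega
          have hB : exclStep cur idx bs = (cur, idx) := by
            unfold exclStep
            rcases hM2 : bs.foldl (fun m e => PySem.Set.union m (idx.getD e [])) ([] : PySem.Set Int) with _ | ⟨a, _ | ⟨b, u⟩⟩
            all_goals try rfl
            rw [hM2] at hik hik2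
            simp only [List.mem_singleton] at hik hik2
            exact absurd (hik.trans hik2.symm) hkne
          rw [hfil] at hA
          constructor
          · simp [hA, hB]
          · rw [hB]
            exact hinv

-- ===== VERDICT (by name: the statement is the Claim_ definition above) =====
theorem exclusion_spec : Claim_equal_exclusion := by
  intro learnList badguysets hdom
  clear hdom
  show exclusion learnList badguysets = exclusion_alt learnList badguysets
  unfold exclusion exclusion_alt
  have main : ∀ (gs : List (List Int)) (cur : List (List Int)) (idx : PySem.Dict Int (PySem.Set Int)),
      ExclInv cur idx →
      gs.foldl (fun cur badset =>
        let r := exclInner badset (PySem.List.enumerate cur 0) false cur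
        if r.1 = true then r.2 else cur) cur
      = (gs.foldl (fun st badset => exclStep st.1 st.2 badset) (cur, idx)).1 := by
    intro gs
    induction gs with
    | nil => intro cur idx _; rfl
    | cons bs rest ih =>
        intro cur idx hinv
        simp only [List.foldl_cons]
        obtain ⟨heq, hinv'⟩ := step_eq_and_inv cur idx bs hinv
        rw [heq]
        exact ih _ _ hinv'
  exact main badguysets learnList (buildIndex learnList) (inv_build learnList)
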